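-- pv_equiv track=rewrite | github.com/ahar0n/python-notebooks | 02 Control de flujo/solucion/ppu_digito_verificador.py | numero_dv
-- ===== SOURCE A (Python) =====
-- def numero_dv(bbbb, nn):
--     alfabeto_ppu = 'BCDFGHJKLPRSTVWXYZ'
--     numerico_ppu = '123456789023456789'
--
--     i = 1
--     nd = 0
--     while i <= len(bbbb):
--         indice = alfabeto_ppu.index(bbbb[-i])
--         ndi = int(numerico_ppu[indice])
--         nd += ndi * 10 ** (i-1)
--         i += 1
--     ndv = nd * 100 + nn
--     return ndv
-- ===== SOURCE B (Python) =====
-- def numero_dv(bbbb, nn):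
--     alfabeto_ppu = 'BCDFGHJKLPRSTVWXYZ'
--     numerico_ppu = '123456789023456789'
--     nd = 0
--     for c in bbbb:
--         nd = nd * 10 + int(numerico_ppu[alfabeto_ppu.index(c)])
--     return nd * 100 + nn
-- ===== Notes on version B (the rewrite author's own statement) =====
-- stated objective: simpler
-- what changed: B scans the plate left-to-right with a Horner accumulator (nd = nd*10 + digit) instead of A's right-to-left while loop over negative indices bbbb[-i] with explicit 10**(i-1) positional powers.
import Mathlib
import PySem

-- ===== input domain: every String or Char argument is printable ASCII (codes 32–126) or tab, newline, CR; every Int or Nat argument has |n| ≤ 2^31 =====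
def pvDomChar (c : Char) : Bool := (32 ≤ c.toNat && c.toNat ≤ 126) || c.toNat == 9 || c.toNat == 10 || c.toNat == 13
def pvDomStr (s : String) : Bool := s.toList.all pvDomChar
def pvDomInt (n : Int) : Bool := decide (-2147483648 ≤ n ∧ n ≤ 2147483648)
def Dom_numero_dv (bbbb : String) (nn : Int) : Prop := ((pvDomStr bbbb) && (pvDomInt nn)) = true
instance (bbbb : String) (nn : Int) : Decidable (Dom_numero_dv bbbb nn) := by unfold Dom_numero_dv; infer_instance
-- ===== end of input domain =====

-- B replaces A's right-to-left while loop (negative indices, explicit 10**(i-1) powers)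
-- by a left-to-right Horner fold; return values proved equal wherever Python A returns.

def pvAlfabeto : List Char :=  -- 'BCDFGHJKLPRSTVWXYZ'
  ['B','C','D','F','G','H','J','K','L','P','R','S','T','V','W','X','Y','Z']
def pvNumerico : List Char :=  -- '123456789023456789'
  ['1','2','3','4','5','6','7','8','9','0','2','3','4','5','6','7','8','9']

-- ===== PORT A =====
-- while i <= len(bbbb): nd += int(numerico_ppu[alfabeto_ppu.index(bbbb[-i])]) * 10**(i-1); i += 1
-- (the .getD defaults are unreachable on Pre_, where every bbbb[-i] is in the alphabet)
def numero_dv_loop (chars : List Char) (i : Nat) (nd : Int) : Int :=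
  if h : i ≤ chars.length then
    let c := (PySem.List.pyGet? chars (-(i : Int))).getD ' '
    let indice := (PySem.List.index? pvAlfabeto c).getD 0
    let ndi := (PySem.Int.ofChars? [(PySem.List.pyGet? pvNumerico (indice : Int)).getD ' ']).getD 0
    numero_dv_loop chars (i + 1) (nd + ndi * 10 ^ (i - 1))
  else nd
termination_by chars.length + 1 - i

def numero_dv (bbbb : String) (nn : Int) : Int :=
  numero_dv_loop bbbb.toList 1 0 * 100 + nn

-- ===== PORT B =====
-- int(numerico_ppu[alfabeto_ppu.index(c)])
def pvDigito (c : Char) : Int :=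
  (PySem.Int.ofChars? [(PySem.List.pyGet? pvNumerico (((PySem.List.index? pvAlfabeto c).getD 0 : Nat) : Int)).getD ' ']).getD 0

def numero_dv_alt (bbbb : String) (nn : Int) : Int :=
  bbbb.toList.foldl (fun nd c => nd * 10 + pvDigito c) 0 * 100 + nn

-- ===== PRECONDITION & SPEC =====
-- Pre_ excludes exactly the inputs where A raises ValueError: a character of bbbb not in the plate alphabet.
def Pre_numero_dv (bbbb : String) (_nn : Int) : Prop := bbbb.toList.all (fun c => pvAlfabeto.contains c) = true
instance (bbbb : String) (nn : Int) : Decidable (Pre_numero_dv bbbb nn) := by unfold Pre_numero_dv; infer_instance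
def pvWitness_numero_dv : String × Int := ("BCDF", 34)

def Spec_numero_dv (bbbb : String) (nn : Int) (out : Int) : Prop := out = numero_dv_alt bbbb nn
instance (bbbb : String) (nn : Int) (out : Int) : Decidable (Spec_numero_dv bbbb nn out) := by unfold Spec_numero_dv; infer_instance

-- ===== CLAIM (what is proved, stated in full; the proofs are below) =====
def Claim_equal_numero_dv : Prop := ∀ (bbbb : String) (nn : Int), Dom_numero_dv bbbb nn → Pre_numero_dv bbbb nn → Spec_numero_dv bbbb nn (numero_dv bbbb nn)

-- ===== LEMMAS AND PROOFS =====

-- A's loop from i upward equals nd plus 10^(i-1) times the Horner value of the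
-- first (len + 1 - i) characters: the downward-counting invariant of A's while loop.
lemma numero_dv_loop_eq (chars : List Char) :
    ∀ (j i : Nat) (nd : Int), 1 ≤ i → chars.length + 1 - i = j →
      numero_dv_loop chars i nd =
        nd + 10 ^ (i - 1) *
          ((chars.take (chars.length + 1 - i)).foldl (fun a c => a * 10 + pvDigito c) 0) := by
  intro j
  induction j with
  | zero =>
    intro i nd h1 hj
    have hgt : ¬ i ≤ chars.length := by omega
    rw [numero_dv_loop]
    simp [hgt, hj]
  | succ j ih =>
    intro i nd h1 hj
    have hle : i ≤ chars.length := by omega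
    have hidx : chars.length - i < chars.length := by omega
    rw [numero_dv_loop]
    simp only [hle, dif_pos]
    rw [PySem.List.pyGet?_neg_natCast chars i h1 hle]
    rw [List.getElem?_eq_getElem hidx]
    have hrec := ih (i + 1) (nd + pvDigito chars[chars.length - i] * 10 ^ (i - 1))
      (by omega) (by omega)
    simp only [Option.getD_some]
    rw [show (numero_dv_loop chars (i + 1)
        (nd + (PySem.Int.ofChars? [(PySem.List.pyGet? pvNumerico
          (((PySem.List.index? pvAlfabeto chars[chars.length - i]).getD 0 : Nat) : Int)).getD ' ']).getD 0
          * 10 ^ (i - 1))) =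
      numero_dv_loop chars (i + 1) (nd + pvDigito chars[chars.length - i] * 10 ^ (i - 1)) from rfl]
    rw [show chars.length + 1 - (i + 1) = chars.length - i from by omega] at hrec
    rw [hrec]
    have htake : chars.take (chars.length + 1 - i) =
        chars.take (chars.length - i) ++ [chars[chars.length - i]] := by
      have : chars.length + 1 - i = (chars.length - i) + 1 := by omega
      rw [this, List.take_add_one, List.getElem?_eq_getElem hidx]
      rfl
    rw [htake, List.foldl_append]
    simp only [List.foldl_cons, List.foldl_nil]
    have hi : i = (i - 1) + 1 := by omega
    have hpow : (10 : Int) ^ ((i + 1) - 1) = 10 ^ (i - 1) * 10 := by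
      rw [show (i + 1) - 1 = (i - 1) + 1 from by omega, pow_succ]
    rw [hpow]
    ring

-- ===== VERDICT (by name: the statement is the Claim_ definition above) =====
theorem numero_dv_spec : Claim_equal_numero_dv := by
  intro bbbb nn _ _
  unfold Spec_numero_dv numero_dv numero_dv_alt
  rw [numero_dv_loop_eq bbbb.toList bbbb.toList.length 1 0 (by omega) (by omega)]
  rw [show bbbb.toList.length + 1 - 1 = bbbb.toList.length from by omega, List.take_length]
  ring
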